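-- pv_equiv track=rewrite | github.com/simond3414/teacher_printer | app.py | get_page_counts
-- ===== SOURCE A (Python) =====
-- def get_page_counts(selections_dict):
--     """Count images per page number.
--
--     Args:
--         selections_dict (dict): Image to page mappings
--
--     Returns:
--         dict: {page_num: image_count} sorted by page number (excludes page 0)
--     """
--     page_counts = {}
--     for img_key, page_num in selections_dict.items():
--         if page_num == 0:  # Skip excluded images
--             continue
--         if page_num not in page_counts:
--             page_counts[page_num] = 0
--         page_counts[page_num] += 1
--     return dict(sorted(page_counts.items()))
-- ===== SOURCE B (Python) =====
-- def get_page_counts(selections_dict):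
--     """Count images per page: sort the nonzero pages, then one run-length pass."""
--     pages = sorted(p for p in selections_dict.values() if p != 0)
--     if not pages:
--         return {}
--     result = {}
--     cur, cnt = pages[0], 1
--     for p in pages[1:]:
--         if p == cur:
--             cnt += 1
--         else:
--             result[cur] = cnt
--             cur, cnt = p, 1
--     result[cur] = cnt
--     return result
-- ===== Notes on version B (the rewrite author's own statement) =====
-- stated objective: alternative
-- what changed: Replaces hash-count-then-sort-of-items with sort-the-nonzero-pages-then-one-run-length-grouping-pass; the result dict is built directly in page order from contiguous runs.
import Mathlib
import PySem

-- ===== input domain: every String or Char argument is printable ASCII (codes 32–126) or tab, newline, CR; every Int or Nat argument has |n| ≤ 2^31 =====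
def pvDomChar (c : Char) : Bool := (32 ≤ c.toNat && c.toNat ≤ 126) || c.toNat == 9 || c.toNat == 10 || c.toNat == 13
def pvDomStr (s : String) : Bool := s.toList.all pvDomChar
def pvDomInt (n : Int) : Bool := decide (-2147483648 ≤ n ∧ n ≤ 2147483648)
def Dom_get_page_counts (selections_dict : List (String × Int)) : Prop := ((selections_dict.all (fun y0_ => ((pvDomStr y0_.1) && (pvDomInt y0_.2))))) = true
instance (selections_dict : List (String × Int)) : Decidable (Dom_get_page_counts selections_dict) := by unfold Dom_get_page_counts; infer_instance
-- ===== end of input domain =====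

-- B replaces A's hash-count-then-sort-items with sort-the-nonzero-pages-then-one-run-length
-- grouping pass (objective: alternative algorithm of similar cost).

-- ===== PORT A =====
def get_page_counts (selections_dict : List (String × Int)) : List (Int × Int) :=
  let page_counts := selections_dict.foldl
    (fun page_counts kv =>
      if kv.2 = 0 then page_counts
      else
        let page_counts := if page_counts.contains kv.2 then page_counts else page_counts.insert kv.2 0
        page_counts.insert kv.2 (page_counts.getD kv.2 0 + 1))
    (PySem.Dict.empty : PySem.Dict Int Int)
  PySem.List.sorted2 page_counts.items (fun p => p.1) (fun p => p.2)

-- ===== PORT B =====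
-- B-side helper: the run-length loop over the tail of the sorted page list (result dict as assoc list)
def pvRleLoop (cur cnt : Int) (acc : List (Int × Int)) : List Int → List (Int × Int)
  | [] => acc ++ [(cur, cnt)]
  | p :: ps =>
      if p = cur then pvRleLoop cur (cnt + 1) acc ps
      else pvRleLoop p 1 (acc ++ [(cur, cnt)]) ps

def get_page_counts_alt (selections_dict : List (String × Int)) : List (Int × Int) :=
  match PySem.List.sorted ((selections_dict.map (fun kv => kv.2)).filter (fun p => p != 0)) (fun x => x) with
  | [] => []
  | p :: rest => pvRleLoop p 1 [] rest

-- ===== PRECONDITION & SPEC =====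
def Spec_get_page_counts (selections_dict : List (String × Int)) (out : List (Int × Int)) : Prop := out = get_page_counts_alt selections_dict
instance (selections_dict : List (String × Int)) (out : List (Int × Int)) : Decidable (Spec_get_page_counts selections_dict out) := by unfold Spec_get_page_counts; infer_instance

-- ===== CLAIM (what is proved, stated in full; the proofs are below) =====
def Claim_equal_get_page_counts : Prop := ∀ (selections_dict : List (String × Int)), Dom_get_page_counts selections_dict → Spec_get_page_counts selections_dict (get_page_counts selections_dict)

-- ===== LEMMAS AND PROOFS =====

-- A's loop body equals the plain counter step
lemma pv_stepA (d : PySem.Dict Int Int) (kv : String × Int) :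
    (if kv.2 = 0 then d
     else
       let d1 := if d.contains kv.2 then d else d.insert kv.2 0
       d1.insert kv.2 (d1.getD kv.2 0 + 1)) =
    (if kv.2 = 0 then d else d.insert kv.2 (d.getD kv.2 0 + 1)) := by
  by_cases h0 : kv.2 = 0
  · simp [h0]
  · simp only [h0, if_neg]
    by_cases hc : d.contains kv.2
    · simp [hc]
    · simp only [hc, Bool.false_eq_true, if_false]
      rw [PySem.Dict.getD_insert_self, PySem.Dict.insert_insert_self,
        PySem.Dict.getD_of_not_contains d 0 (by simpa using hc)]

-- A's fold builds the counter of the nonzero values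
lemma pv_foldA (sd : List (String × Int)) : ∀ (d : PySem.Dict Int Int),
    sd.foldl
      (fun page_counts kv =>
        if kv.2 = 0 then page_counts
        else
          let d1 := if page_counts.contains kv.2 then page_counts else page_counts.insert kv.2 0
          d1.insert kv.2 (d1.getD kv.2 0 + 1)) d =
    ((sd.map (fun kv => kv.2)).filter (fun p => p != 0)).foldl
      (fun d x => d.insert x (d.getD x 0 + 1)) d := by
  induction sd with
  | nil => intro d; rfl
  | cons kv rest ih =>
      intro d
      simp only [List.foldl_cons, List.map_cons, List.filter_cons]
      rw [pv_stepA]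
      by_cases h0 : kv.2 = 0
      · simp [h0, ih]
      · simp only [h0, if_neg, bne_iff_ne, ne_eq, not_false_iff, if_true, List.foldl_cons]
        exact ih _

-- insertBy with predicates agreeing on the inserted element
lemma pv_insertBy_congr {α : Type} (p q : α → α → Bool) (x : α) :
    ∀ (ys : List α), (∀ y ∈ ys, p x y = q x y) →
      PySem.List.insertBy p x ys = PySem.List.insertBy q x ys := by
  intro ys
  induction ys with
  | nil => intro _; rfl
  | cons y ys ih =>
      intro h
      simp only [PySem.List.insertBy]
      rw [h y (by simp)]
      by_cases hq : q x y
      · simp [hq]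
      · simp only [hq, Bool.false_eq_true, if_false]
        rw [ih (fun z hz => h z (by simp [hz]))]

-- the two insertion predicates (tuple-lexicographic vs first component)
lemma pv_before_eq (a b : Int × Int) (h : a.1 ≠ b.1) :
    (decide (a.1 < b.1) || (!decide (b.1 < a.1) && decide (a.2 < b.2))) = decide (a.1 < b.1) := by
  rcases lt_or_gt_of_ne h with h1 | h1
  · simp [h1]
  · simp [h1, not_lt_of_gt h1]

-- folding insertBy with the lex predicate = with the fst predicate on fst-distinct input
lemma pv_fold_insertBy_congr : ∀ (xs acc : List (Int × Int)),
    xs.Pairwise (fun a b => a.1 ≠ b.1) →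
    (∀ a ∈ xs, ∀ b ∈ acc, a.1 ≠ b.1) →
    xs.foldl (fun acc x => PySem.List.insertBy
        (fun a b => decide (a.1 < b.1) || (!decide (b.1 < a.1) && decide (a.2 < b.2))) x acc) acc =
    xs.foldl (fun acc x => PySem.List.insertBy (fun a b => decide (a.1 < b.1)) x acc) acc := by
  intro xs
  induction xs with
  | nil => intro acc _ _; rfl
  | cons x xs ih =>
      intro acc hpw hacc
      simp only [List.foldl_cons]
      rw [pv_insertBy_congr
        (fun a b => decide (a.1 < b.1) || (!decide (b.1 < a.1) && decide (a.2 < b.2)))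
        (fun a b => decide (a.1 < b.1)) x acc
        (fun y hy => pv_before_eq x y (hacc x (by simp) y hy))]
      apply ih
      · exact hpw.of_cons
      · intro a ha b hb
        rw [PySem.List.mem_insertBy] at hb
        rcases hb with rfl | hb
        · exact ((List.pairwise_cons.1 hpw).1 a ha).symm
        · exact hacc a (by simp [ha]) b hb

-- Set.ofList by fold: an untouched prefix splits off
lemma pv_foldl_add_prefix : ∀ (ys acc1 acc2 : List Int),
    (∀ y ∈ ys, y ∉ acc1) →
    (ys.foldl PySem.Set.add (acc1 ++ acc2)) = acc1 ++ ys.foldl PySem.Set.add acc2 := by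
  intro ys
  induction ys with
  | nil => intro _ _ _; rfl
  | cons y ys ih =>
      intro acc1 acc2 h
      simp only [List.foldl_cons]
      have hy : y ∉ acc1 := h y (by simp)
      have hstep : PySem.Set.add (acc1 ++ acc2) y = acc1 ++ PySem.Set.add acc2 y := by
        by_cases h2 : y ∈ acc2
        · simp [PySem.Set.add, PySem.Set.contains, h2]
        · simp [PySem.Set.add, PySem.Set.contains, h2, hy]
      rw [hstep, ih acc1 _ (fun z hz => h z (by simp [hz]))]

-- filtering out an already-present element does not change the fold
lemma pv_foldl_add_filter : ∀ (ys : List Int) (acc : List Int) (x : Int), x ∈ acc →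
    ys.foldl PySem.Set.add acc = (ys.filter (fun y => y != x)).foldl PySem.Set.add acc := by
  intro ys
  induction ys with
  | nil => intro _ _ _; rfl
  | cons y ys ih =>
      intro acc x hx
      by_cases hyx : y = x
      · subst hyx
        have hstep : PySem.Set.add acc y = acc := by
          simp [PySem.Set.add, PySem.Set.contains, hx]
        simp only [List.filter_cons, bne_self_eq_false, Bool.false_eq_true, if_false,
          List.foldl_cons, hstep]
        exact ih acc y hx
      · simp only [List.filter_cons, bne_iff_ne, ne_eq, hyx, not_false_iff, decide_true,
          if_true, List.foldl_cons]
        apply ih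
        rw [PySem.Set.add]
        split <;> simp [hx]

-- Set.ofList of a cons
lemma pv_ofList_cons (p : Int) (ps : List Int) :
    PySem.Set.ofList (p :: ps) = p :: PySem.Set.ofList (ps.filter (fun y => y != p)) := by
  simp only [PySem.Set.ofList, List.foldl_cons]
  have h1 : PySem.Set.add PySem.Set.empty p = [p] := rfl
  rw [h1]
  have h2 : ([p] : List Int) = [p] ++ ([] : List Int) := rfl
  rw [pv_foldl_add_filter ps [p] p (by simp), h2,
    pv_foldl_add_prefix (ps.filter (fun y => y != p)) [p] []
      (by intro y hy; simp at hy; simp [hy.2])]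
  rfl

-- ofList is a sublist
lemma pv_foldl_add_sublist : ∀ (ys acc : List Int), (ys.foldl PySem.Set.add acc).Sublist (acc ++ ys) := by
  intro ys
  induction ys with
  | nil => intro acc; simp
  | cons y ys ih =>
      intro acc
      simp only [List.foldl_cons]
      by_cases hy : y ∈ acc
      · have hstep : PySem.Set.add acc y = acc := by simp [PySem.Set.add, PySem.Set.contains, hy]
        rw [hstep]
        exact (ih acc).trans (by
          apply List.Sublist.append_left
          exact List.sublist_cons_self y ys)
      · have hstep : PySem.Set.add acc y = acc ++ [y] := by
          simp [PySem.Set.add, PySem.Set.contains, hy]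
        rw [hstep]
        simpa using ih (acc ++ [y])

lemma pv_ofList_sublist (ys : List Int) : (PySem.Set.ofList ys).Sublist ys := by
  simpa using pv_foldl_add_sublist ys []

lemma pv_mem_ofList_filter_ne {k p : Int} {ps : List Int}
    (hk : k ∈ PySem.Set.ofList (ps.filter (fun y => y != p))) : k ≠ p := by
  have h := (pv_ofList_sublist (ps.filter (fun y => y != p))).mem hk
  simp only [List.mem_filter, bne_iff_ne, ne_eq, decide_eq_true_eq] at h
  exact h.2

-- run-length invariant on a sorted list
lemma pv_rle_spec : ∀ (l : List Int) (cur cnt : Int) (acc : List (Int × Int)),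
    (cur :: l).Pairwise (· ≤ ·) →
    pvRleLoop cur cnt acc l =
      acc ++ (cur, cnt + (l.count cur : Int)) ::
        (PySem.Set.ofList (l.filter (fun y => y != cur))).map (fun k => (k, (l.count k : Int))) := by
  intro l
  induction l with
  | nil => intro cur cnt acc _; simp [pvRleLoop, PySem.Set.ofList]
  | cons p ps ih =>
      intro cur cnt acc hpw
      rcases List.pairwise_cons.1 hpw with ⟨hcur, hps⟩
      by_cases hpc : p = cur
      · rw [pvRleLoop, if_pos hpc]
        subst hpc
        rw [ih p (cnt + 1) acc hps]
        congr 1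
        simp only [List.count_cons_self, List.filter_cons, bne_self_eq_false,
          Bool.false_eq_true, if_false]
        have hhd : cnt + 1 + ((ps.count p : Nat) : Int) = cnt + ((ps.count p + 1 : Nat) : Int) := by
          push_cast; ring
        rw [hhd]
        congr 1
        apply List.map_congr_left
        intro k hk
        have hk' : k ≠ p := pv_mem_ofList_filter_ne hk
        simp [List.count_cons, hk', Ne.symm hk']
      · have hlt : cur < p := lt_of_le_of_ne (hcur p (by simp)) (fun h => hpc h.symm)
        have hnotin : cur ∉ p :: ps := by
          intro hmem
          rcases List.mem_cons.1 hmem with rfl | hmem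
          · exact hpc rfl
          · exact absurd ((List.pairwise_cons.1 hps).1 cur hmem) (by omega)
        rw [pvRleLoop, if_neg hpc, ih p 1 (acc ++ [(cur, cnt)]) hps]
        have hc0 : (p :: ps).count cur = 0 := List.count_eq_zero_of_not_mem hnotin
        have hfilt : (p :: ps).filter (fun y => y != cur) = p :: ps := by
          apply List.filter_eq_self.2
          intro a ha
          simp only [bne_iff_ne, ne_eq, decide_eq_true_eq]
          intro h; exact hnotin (h ▸ ha)
        rw [hc0, hfilt, pv_ofList_cons]
        simp only [List.map_cons, List.count_cons_self, List.append_assoc, List.cons_append,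
          List.nil_append, Nat.cast_zero, add_zero]
        have hh : (1 : Int) + ((ps.count p : Nat) : Int) = ((ps.count p + 1 : Nat) : Int) := by
          push_cast; ring
        rw [hh]
        congr 3
        apply List.map_congr_left
        intro k hk
        have hk' : k ≠ p := pv_mem_ofList_filter_ne hk
        simp [List.count_cons, hk', Ne.symm hk']

-- the run-length of a sorted cons, as a map over its distinct elements
lemma pv_map_count_cons (p : Int) (rest : List Int) :
    (PySem.Set.ofList (p :: rest)).map (fun k => (k, ((p :: rest).count k : Int))) =
      (p, 1 + (rest.count p : Int)) ::
        (PySem.Set.ofList (rest.filter (fun y => y != p))).map (fun k => (k, (rest.count k : Int))) := by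
  rw [pv_ofList_cons]
  simp only [List.map_cons, List.count_cons_self]
  congr 1
  · congr 1
    push_cast; ring
  · apply List.map_congr_left
    intro k hk
    have hk' : k ≠ p := pv_mem_ofList_filter_ne hk
    simp [List.count_cons, hk', Ne.symm hk']

-- ===== VERDICT (by name: the statement is the Claim_ definition above) =====
theorem get_page_counts_spec : Claim_equal_get_page_counts := by
  intro sd _
  unfold Spec_get_page_counts get_page_counts get_page_counts_alt
  rw [pv_foldA, PySem.Dict.foldl_insert_getD_add_one_eq_counter]
  generalize hvals : (sd.map (fun kv => kv.2)).filter (fun p => p != 0) = vals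
  cases hseq : PySem.List.sorted vals (fun x => x) with
  | nil =>
      have hv : vals = [] := (PySem.List.sorted_eq_nil_iff vals (fun x => x) false).1 hseq
      subst hv
      rfl
  | cons p rest =>
      show PySem.List.sorted2 (PySem.Dict.counter vals).items (fun q => q.1) (fun q => q.2) =
        pvRleLoop p 1 [] rest
      have hspw : (p :: rest).Pairwise (· ≤ ·) := by
        rw [← hseq]
        simpa using PySem.List.sorted_pairwise vals (fun x => x)
      have hsperm : (p :: rest).Perm vals := by
        rw [← hseq]; exact PySem.List.sorted_perm _ _ _
      rw [pv_rle_spec rest p 1 [] hspw, List.nil_append, ← pv_map_count_cons]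
      -- the target list, with counts taken in vals
      have hcount : ∀ k : Int, (p :: rest).count k = vals.count k := fun k => hsperm.count_eq k
      have hmapeq : (PySem.Set.ofList (p :: rest)).map (fun k => (k, ((p :: rest).count k : Int))) =
          (PySem.Set.ofList (p :: rest)).map (fun k => (k, (vals.count k : Int))) := by
        apply List.map_congr_left; intro k _; rw [hcount k]
      rw [hmapeq]
      have hitems : (PySem.Dict.counter vals).items =
          (PySem.Set.ofList vals).map (fun k => (k, (vals.count k : Int))) :=
        PySem.Dict.items_counter vals
      -- permutation with the counter items
      have htgt_perm : ((PySem.Set.ofList (p :: rest)).map (fun k => (k, (vals.count k : Int)))).Perm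
          ((PySem.Dict.counter vals).items) := by
        rw [hitems]
        apply List.Perm.map
        apply (List.perm_ext_iff_of_nodup (PySem.Set.nodup_ofList _) (PySem.Set.nodup_ofList _)).2
        intro a
        rw [PySem.Set.mem_ofList, PySem.Set.mem_ofList, List.Perm.mem_iff hsperm]
      -- strictly increasing first components
      have hset_lt : (PySem.Set.ofList (p :: rest)).Pairwise (· < ·) := by
        have hle : (PySem.Set.ofList (p :: rest)).Pairwise (· ≤ ·) :=
          hspw.sublist (pv_ofList_sublist (p :: rest))
        have hnd : (PySem.Set.ofList (p :: rest)).Pairwise (· ≠ ·) :=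
          List.nodup_iff_pairwise_ne.1 (PySem.Set.nodup_ofList (p :: rest))
        exact (hle.and hnd).imp (fun h => lt_of_le_of_ne h.1 h.2)
      have htgt_pw : ((PySem.Set.ofList (p :: rest)).map (fun k => (k, (vals.count k : Int)))).Pairwise
          (fun a b => a.1 < b.1) := by
        rw [List.pairwise_map]
        exact hset_lt
      -- items have pairwise-distinct first components
      have hitems_ne : ((PySem.Dict.counter vals).items).Pairwise (fun a b => a.1 ≠ b.1) := by
        rw [hitems, List.pairwise_map]
        exact List.nodup_iff_pairwise_ne.1 (PySem.Set.nodup_ofList vals)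
      -- sorted2 = sorted by fst here
      have hsorted2 : PySem.List.sorted2 (PySem.Dict.counter vals).items
          (fun q => q.1) (fun q => q.2) =
          PySem.List.sorted ((PySem.Dict.counter vals).items) (fun q => q.1) := by
        rw [PySem.List.sorted_eq_foldl_insertBy]
        simp only [PySem.List.sorted2]
        exact pv_fold_insertBy_congr _ [] hitems_ne (by simp)
      rw [hsorted2]
      exact PySem.List.sorted_eq_of_perm_of_pairwise_lt _ _ _ htgt_perm htgt_pw
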